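-- pv_equiv track=rewrite | github.com/marirsg2/ORBUS | manager/BASIC_main_manager.py | insert_liked_disliked_features
-- ===== SOURCE A (Python) =====
-- def string_char_split(input_string):
--     """
--
--     :param input_string:
--     :return:
--     """
--     ret_obj = []
--     ret_obj.extend(input_string)
--     return ret_obj
--
-- def look_for_ordered_feature(feature_char_list, plan_char_seq):
--     """
--
--     :param feature_char_list:
--     :param plan_char_seq:
--     :return:
--     """
--     found_state = True
--     for single_char in feature_char_list:
--         if single_char not in plan_char_seq:
--             found_state = False
--             break
--         #end if
--         plan_char_seq = plan_char_seq[plan_char_seq.index(single_char)+1:]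
--     #end for
--     return found_state
--
-- def insert_liked_disliked_features(all_plans,liked_features,disliked_features):
--     """
--
--     :param all_plans:
--     :param liked_features:
--     :param disliked_features:
--     :return:
--     """
--     #todo NOTE cannot just check the features in the formatted dict because rare features below cutoff will not be there
--     formatted_plans_struct = []
--     for single_plan in all_plans:
--         found_like_features = []
--         for single_liked in liked_features:
--             if look_for_ordered_feature(single_liked,single_plan):
--                 found_like_features.append(string_char_split(single_liked))
--         found_dislike_features = []
--         for single_disliked in disliked_features:
--             if look_for_ordered_feature(single_disliked,single_plan):
--                 found_dislike_features.append(string_char_split(single_disliked))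
--         formatted_plans_struct.append( [single_plan,found_like_features,found_dislike_features] )
--     #end outermost for
--     return formatted_plans_struct
-- ===== SOURCE B (Python) =====
-- def insert_liked_disliked_features(all_plans, liked_features, disliked_features):
--     def is_subseq(feature, plan):
--         i = -1
--         for ch in feature:
--             i = plan.find(ch, i + 1)
--             if i < 0:
--                 return False
--         return True
--     return [[plan,
--              [list(f) for f in liked_features if is_subseq(f, plan)],
--              [list(f) for f in disliked_features if is_subseq(f, plan)]]
--             for plan in all_plans]
-- ===== Notes on version B (the rewrite author's own statement) =====
-- stated objective: alternative
-- what changed: Replaces the repeated 'in'+index+slice subsequence scan (which rescans membership and copies the remaining plan suffix for every feature character) with a single resumable str.find cursor over the plan, and builds the result by nested comprehensions instead of accumulator loops.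
import Mathlib
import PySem

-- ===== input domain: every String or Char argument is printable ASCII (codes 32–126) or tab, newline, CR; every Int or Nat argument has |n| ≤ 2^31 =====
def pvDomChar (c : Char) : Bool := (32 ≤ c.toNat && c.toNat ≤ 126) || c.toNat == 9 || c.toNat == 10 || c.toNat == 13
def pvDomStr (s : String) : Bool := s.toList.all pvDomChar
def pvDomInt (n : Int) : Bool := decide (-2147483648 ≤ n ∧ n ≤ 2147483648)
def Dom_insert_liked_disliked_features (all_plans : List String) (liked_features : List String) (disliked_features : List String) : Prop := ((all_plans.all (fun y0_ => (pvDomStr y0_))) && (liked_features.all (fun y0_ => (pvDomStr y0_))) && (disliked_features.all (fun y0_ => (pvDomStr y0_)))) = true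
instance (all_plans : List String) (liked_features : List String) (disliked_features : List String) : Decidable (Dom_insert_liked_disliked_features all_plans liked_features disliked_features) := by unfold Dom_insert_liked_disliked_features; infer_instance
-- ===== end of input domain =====

-- B: subsequence test via a single resumable find cursor instead of repeated membership+index+slice scans; result built by map/filter instead of accumulator loops.


-- ===== PORT A =====
-- ret_obj.extend(input_string): append each character of the string (as a 1-char string) in turn
def pv_string_char_split (input_string : String) : List String :=
  input_string.toList.foldl (fun ret_obj c => ret_obj ++ [String.ofList [c]]) []

-- look_for_ordered_feature: loop with found_state and break, as structural recursion on the feature chars;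
-- 'plan_char_seq[plan_char_seq.index(c)+1:]' is 'plan.drop (plan.idxOf c + 1)'
def pv_look_for_ordered_feature : List Char → List Char → Bool
  | [], _ => true
  | c :: rest, plan =>
    if c ∈ plan then pv_look_for_ordered_feature rest (plan.drop (plan.idxOf c + 1))
    else false

def insert_liked_disliked_features (all_plans : List String) (liked_features : List String) (disliked_features : List String) : List (String × List (List String) × List (List String)) :=
  all_plans.foldl (fun acc single_plan =>
    let found_like := liked_features.foldl (fun ls f =>
      if pv_look_for_ordered_feature f.toList single_plan.toList then ls ++ [pv_string_char_split f] else ls) []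
    let found_dislike := disliked_features.foldl (fun ls f =>
      if pv_look_for_ordered_feature f.toList single_plan.toList then ls ++ [pv_string_char_split f] else ls) []
    acc ++ [(single_plan, found_like, found_dislike)]) []

-- ===== PORT B =====
-- B's is_subseq: 'i = plan.find(ch, i+1)' resumes the scan just past the previous hit; on lists this is
-- exact as: skip the plan prefix before the first occurrence of ch (find fails ⇔ nothing left), continue after it.
def pv_is_subseq : List Char → List Char → Bool
  | [], _ => true
  | c :: f, p =>
    match p.dropWhile (fun x => !(x == c)) with
    | [] => false
    | _ :: ps => pv_is_subseq f ps

def pv_chars (s : String) : List String := s.toList.map (fun c => String.ofList [c])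

def insert_liked_disliked_features_alt (all_plans : List String) (liked_features : List String) (disliked_features : List String) : List (String × List (List String) × List (List String)) :=
  all_plans.map (fun plan =>
    (plan,
     (liked_features.filter (fun f => pv_is_subseq f.toList plan.toList)).map pv_chars,
     (disliked_features.filter (fun f => pv_is_subseq f.toList plan.toList)).map pv_chars))

-- ===== PRECONDITION & SPEC =====
def Spec_insert_liked_disliked_features (all_plans : List String) (liked_features : List String) (disliked_features : List String) (out : List (String × List (List String) × List (List String))) : Prop := out = insert_liked_disliked_features_alt all_plans liked_features disliked_features
instance (all_plans : List String) (liked_features : List String) (disliked_features : List String) (out : List (String × List (List String) × List (List String))) : Decidable (Spec_insert_liked_disliked_features all_plans liked_features disliked_features out) := by unfold Spec_insert_liked_disliked_features; infer_instance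

-- ===== CLAIM (what is proved, stated in full; the proofs are below) =====
def Claim_equal_insert_liked_disliked_features : Prop := ∀ (all_plans : List String) (liked_features : List String) (disliked_features : List String), Dom_insert_liked_disliked_features all_plans liked_features disliked_features → Spec_insert_liked_disliked_features all_plans liked_features disliked_features (insert_liked_disliked_features all_plans liked_features disliked_features)

-- ===== LEMMAS AND PROOFS =====

theorem pv_dropWhile_nil_iff (p : List Char) (c : Char) :
    p.dropWhile (fun x => !(x == c)) = [] ↔ c ∉ p := by
  rw [List.dropWhile_eq_nil_iff]
  constructor
  · intro h hc
    have := h c hc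
    simp at this
  · intro h x hx
    have : x ≠ c := fun hxc => h (hxc ▸ hx)
    simp [this]

theorem pv_drop_idxOf (p : List Char) (c : Char) (h : c ∈ p) :
    p.drop (p.idxOf c + 1) = (p.dropWhile (fun x => !(x == c))).tail := by
  induction p with
  | nil => simp at h
  | cons q ps ih =>
    by_cases hq : q = c
    · subst hq
      simp
    · have hqc : (q == c) = false := by simp [hq]
      have hm : c ∈ ps := by
        rcases List.mem_cons.mp h with h' | h'
        · exact absurd h'.symm hq
        · exact h'
      simp [List.idxOf_cons, hqc, ih hm]

theorem pv_look_eq_subseq : ∀ (f p : List Char), pv_look_for_ordered_feature f p = pv_is_subseq f p := by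
  intro f
  induction f with
  | nil => intro p; simp [pv_look_for_ordered_feature, pv_is_subseq]
  | cons c f' ih =>
    intro p
    by_cases hc : c ∈ p
    · cases hdw : p.dropWhile (fun x => !(x == c)) with
      | nil => exact absurd ((pv_dropWhile_nil_iff p c).mp hdw) (not_not_intro hc)
      | cons y ps =>
        have hdrop : p.drop (p.idxOf c + 1) = ps := by rw [pv_drop_idxOf p c hc, hdw]; rfl
        simp [pv_look_for_ordered_feature, pv_is_subseq, hc, hdw, hdrop, ih]
    · have hdw : p.dropWhile (fun x => !(x == c)) = [] := (pv_dropWhile_nil_iff p c).mpr hc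
      simp [pv_look_for_ordered_feature, pv_is_subseq, hc, hdw]

theorem pv_inner_eq (feats : List String) (plan : List Char) (acc : List (List String)) :
    feats.foldl (fun ls f =>
      if pv_look_for_ordered_feature f.toList plan then ls ++ [pv_string_char_split f] else ls) acc
    = acc ++ (feats.filter (fun f => pv_is_subseq f.toList plan)).map pv_chars := by
  have : (fun (ls : List (List String)) (f : String) =>
      if pv_look_for_ordered_feature f.toList plan then ls ++ [pv_string_char_split f] else ls)
      = (fun ls f => if pv_is_subseq f.toList plan then ls ++ [pv_chars f] else ls) := by
    funext ls f
    have hsp : pv_string_char_split f = pv_chars f := by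
      unfold pv_string_char_split pv_chars
      rw [PySem.List.foldl_append_singleton_eq_map, List.nil_append]
    rw [pv_look_eq_subseq, hsp]
  rw [this, PySem.List.foldl_append_if]

-- ===== VERDICT (by name: the statement is the Claim_ definition above) =====
theorem insert_liked_disliked_features_spec : Claim_equal_insert_liked_disliked_features := by
  intro all_plans liked disliked _
  unfold Spec_insert_liked_disliked_features insert_liked_disliked_features insert_liked_disliked_features_alt
  rw [show (fun (acc : List (String × List (List String) × List (List String))) single_plan =>
      let found_like := liked.foldl (fun ls f =>
        if pv_look_for_ordered_feature f.toList single_plan.toList then ls ++ [pv_string_char_split f] else ls) []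
      let found_dislike := disliked.foldl (fun ls f =>
        if pv_look_for_ordered_feature f.toList single_plan.toList then ls ++ [pv_string_char_split f] else ls) []
      acc ++ [(single_plan, found_like, found_dislike)])
    = (fun acc plan => acc ++ [(plan,
        (liked.filter (fun f => pv_is_subseq f.toList plan.toList)).map pv_chars,
        (disliked.filter (fun f => pv_is_subseq f.toList plan.toList)).map pv_chars)]) from by
      funext acc plan
      simp only [pv_inner_eq, List.nil_append]]
  rw [PySem.List.foldl_append_singleton_eq_map]
  simp
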